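-- pv_equiv track=rewrite | github.com/lu004/Traffic_Light_Status_Detection | code/vid/vid.py | get_final_s
-- ===== SOURCE A (Python) =====
-- def get_final_s(re):
--     c = {}
--     sc = {}
--     for r in re:
--         c[r["s"]] = c[r["s"]] +1 if r["s"] in c else 1
--         sc[r["s"]] = sc[r["s"]] + r["s_sc"] if r["s"] in sc else r["s_sc"]
--
--     ans = max(c, key=c.get)
--     ans_c = max(c.values())
--     for k, v in sc.items():
--         if c[k] == ans_c:
--             return max(sc, key=sc.get)
--
--     return ans
-- ===== SOURCE B (Python) =====
-- def get_final_s(re):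
--     order = []
--     for r in re:
--         if r["s"] not in order:
--             order.append(r["s"])
--     return max(order, key=lambda k: sum(r["s_sc"] for r in re if r["s"] == k))
-- ===== Notes on version B (the rewrite author's own statement) =====
-- stated objective: alternative
-- what changed: B keeps no dictionaries at all: it collects the distinct classes into a list in first-appearance order and returns max over that list keyed by a per-class summation scan of re; A's count dict, count-argmax and trailing loop are dead code and disappear.
import Mathlib
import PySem

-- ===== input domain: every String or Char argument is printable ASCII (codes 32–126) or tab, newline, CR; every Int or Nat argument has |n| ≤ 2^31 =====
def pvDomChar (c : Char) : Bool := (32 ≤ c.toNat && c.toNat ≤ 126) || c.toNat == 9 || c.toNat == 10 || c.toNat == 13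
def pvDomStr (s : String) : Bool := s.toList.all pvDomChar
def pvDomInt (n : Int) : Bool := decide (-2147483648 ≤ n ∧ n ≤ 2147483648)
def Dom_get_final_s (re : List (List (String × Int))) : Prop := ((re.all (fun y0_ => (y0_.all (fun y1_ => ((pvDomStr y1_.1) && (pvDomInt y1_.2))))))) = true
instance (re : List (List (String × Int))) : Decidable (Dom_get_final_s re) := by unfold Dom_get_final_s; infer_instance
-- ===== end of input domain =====

-- B keeps no dicts: it lists the distinct classes in first-appearance order and takes the max
-- of that list keyed by a per-class summation scan of re; same value, same tie-breaking,
-- same empty-input error (A's count dict, count-argmax and trailing loop are dead code).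

-- ===== PORT A =====
-- loop body: c[r["s"]] = c[r["s"]]+1 if r["s"] in c else 1 ; same for sc with r["s_sc"]
-- (r["s"] / r["s_sc"] KeyError when absent: excluded by Pre_, '.getD 0' is never taken there)
def pvStepA (st : PySem.Dict Int Int × PySem.Dict Int Int) (r : List (String × Int)) :
    PySem.Dict Int Int × PySem.Dict Int Int :=
  let k : Int := (PySem.Dict.get? ⟨r⟩ "s").getD 0
  let v : Int := (PySem.Dict.get? ⟨r⟩ "s_sc").getD 0
  (PySem.Dict.insert st.1 k (match st.1.get? k with | some x => x + 1 | none => 1),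
   PySem.Dict.insert st.2 k (match st.2.get? k with | some x => x + v | none => v))

def get_final_s (re : List (List (String × Int))) : Int :=
  let cs := re.foldl pvStepA (⟨[]⟩, ⟨[]⟩)
  let c := cs.1
  let sc := cs.2
  -- ans = max(c, key=c.get); ans_c = max(c.values())  (ValueError on empty: excluded by Pre_)
  let ans := (PySem.List.max? c.keys (fun k => (c.get? k).getD 0)).getD 0
  let ans_c := (PySem.List.max? c.values (fun x => x)).getD 0
  -- for k, v in sc.items(): if c[k] == ans_c: return max(sc, key=sc.get)
  match sc.items.find? (fun p => decide ((c.get? p.1).getD 0 = ans_c)) with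
  | some _ => (PySem.List.max? sc.keys (fun k => (sc.get? k).getD 0)).getD 0
  | none => ans

-- ===== PORT B =====
-- order = []; for r in re: if r["s"] not in order: order.append(r["s"])
def pvOrder (re : List (List (String × Int))) : List Int :=
  re.foldl (fun ks r =>
    let k : Int := (PySem.Dict.get? (⟨r⟩ : PySem.Dict String Int) "s").getD 0
    if k ∈ ks then ks else ks ++ [k]) []

-- sum(r["s_sc"] for r in re if r["s"] == k)
def pvClassSum (re : List (List (String × Int))) (k : Int) : Int :=
  re.foldl (fun acc r =>
    if (PySem.Dict.get? (⟨r⟩ : PySem.Dict String Int) "s").getD 0 = k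
    then acc + (PySem.Dict.get? (⟨r⟩ : PySem.Dict String Int) "s_sc").getD 0 else acc) 0

def get_final_s_alt (re : List (List (String × Int))) : Int :=
  -- return max(order, key=…)  (ValueError on empty: excluded by Pre_, '.getD 0' never taken)
  (PySem.List.max? (pvOrder re) (fun k => pvClassSum re k)).getD 0

-- ===== PRECONDITION & SPEC =====
-- Pre_ excludes exactly the inputs where the Python A raises: an empty list (ValueError from
-- max over the empty dict) and a record without an "s" or "s_sc" key (KeyError).
def Pre_get_final_s (re : List (List (String × Int))) : Prop :=
  re ≠ [] ∧ ∀ r ∈ re, (PySem.Dict.get? (⟨r⟩ : PySem.Dict String Int) "s").isSome = true ∧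
    (PySem.Dict.get? (⟨r⟩ : PySem.Dict String Int) "s_sc").isSome = true
instance (re : List (List (String × Int))) : Decidable (Pre_get_final_s re) := by
  unfold Pre_get_final_s; infer_instance

def pvWitness_get_final_s : (List (List (String × Int))) :=
  [[("s", 1), ("s_sc", 5)], [("s", 2), ("s_sc", 7)], [("s", 1), ("s_sc", 1)]]

def Spec_get_final_s (re : List (List (String × Int))) (out : Int) : Prop := out = get_final_s_alt re
instance (re : List (List (String × Int))) (out : Int) : Decidable (Spec_get_final_s re out) := by
  unfold Spec_get_final_s; infer_instance

-- ===== CLAIM (what is proved, stated in full; the proofs are below) =====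
def Claim_equal_get_final_s : Prop := ∀ (re : List (List (String × Int))), Dom_get_final_s re → Pre_get_final_s re → Spec_get_final_s re (get_final_s re)

-- ===== LEMMAS AND PROOFS =====

-- proof-only helper: the sc component of A's fold, as a standalone fold
def pvStepB (sc : PySem.Dict Int Int) (r : List (String × Int)) : PySem.Dict Int Int :=
  PySem.Dict.insert sc ((PySem.Dict.get? (⟨r⟩ : PySem.Dict String Int) "s").getD 0)
    (sc.getD ((PySem.Dict.get? (⟨r⟩ : PySem.Dict String Int) "s").getD 0) 0
      + (PySem.Dict.get? (⟨r⟩ : PySem.Dict String Int) "s_sc").getD 0)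

theorem pv_snd_fold (re : List (List (String × Int))) :
    ∀ c sc, (List.foldl pvStepA (c, sc) re).2 = List.foldl pvStepB sc re := by
  induction re with
  | nil => intro c sc; rfl
  | cons r rest ih =>
    intro c sc
    have hstep : (pvStepA (c, sc) r).2 = pvStepB sc r := by
      simp only [pvStepA, pvStepB, PySem.Dict.getD]
      cases h : PySem.Dict.get? sc ((PySem.Dict.get? (⟨r⟩ : PySem.Dict String Int) "s").getD 0) with
      | none => simp
      | some _ => rfl
    simp only [List.foldl_cons]
    rw [show pvStepA (c, sc) r = ((pvStepA (c, sc) r).1, pvStepB sc r) from by rw [← hstep]]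
    exact ih _ _

-- keys of the sc fold are B's first-appearance order list
theorem pv_keys_stepB (sc : PySem.Dict Int Int) (r : List (String × Int)) :
    (pvStepB sc r).keys =
      (let k : Int := (PySem.Dict.get? (⟨r⟩ : PySem.Dict String Int) "s").getD 0
       if k ∈ sc.keys then sc.keys else sc.keys ++ [k]) := by
  simp only [pvStepB]
  set k : Int := (PySem.Dict.get? (⟨r⟩ : PySem.Dict String Int) "s").getD 0 with hk
  by_cases h : k ∈ sc.keys
  · rw [PySem.Dict.keys_insert_of_contains _ _ (by rw [PySem.Dict.contains_eq_decide_mem_keys]; simpa)]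
    simp [h]
  · rw [PySem.Dict.keys_insert_of_not_contains _ _ (by rw [PySem.Dict.contains_eq_decide_mem_keys]; simpa)]
    simp [h]

theorem pv_keys_foldB (re : List (List (String × Int))) :
    ∀ sc : PySem.Dict Int Int,
      (List.foldl pvStepB sc re).keys =
        List.foldl (fun ks r =>
          let k : Int := (PySem.Dict.get? (⟨r⟩ : PySem.Dict String Int) "s").getD 0
          if k ∈ ks then ks else ks ++ [k]) sc.keys re := by
  induction re with
  | nil => intro sc; rfl
  | cons r rest ih =>
    intro sc
    simp only [List.foldl_cons]
    rw [ih, pv_keys_stepB]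

-- lookups in the sc fold are B's per-class sums
theorem pv_getD_foldB (re : List (List (String × Int))) :
    ∀ (sc : PySem.Dict Int Int) (k : Int),
      (List.foldl pvStepB sc re).getD k 0 =
        List.foldl (fun acc r =>
          if (PySem.Dict.get? (⟨r⟩ : PySem.Dict String Int) "s").getD 0 = k
          then acc + (PySem.Dict.get? (⟨r⟩ : PySem.Dict String Int) "s_sc").getD 0 else acc)
          (sc.getD k 0) re := by
  induction re with
  | nil => intro sc k; rfl
  | cons r rest ih =>
    intro sc k
    simp only [List.foldl_cons]
    rw [ih]
    congr 1
    simp only [pvStepB, PySem.Dict.getD_insert]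
    by_cases h : (PySem.Dict.get? (⟨r⟩ : PySem.Dict String Int) "s").getD 0 = k
    · simp [h]
    · have h' : ¬ k = (PySem.Dict.get? (⟨r⟩ : PySem.Dict String Int) "s").getD 0 := fun hk => h hk.symm
      simp [h, h']

theorem pv_contains_of_keys_eq {c sc : PySem.Dict Int Int} (h : c.keys = sc.keys) (k : Int) :
    c.contains k = sc.contains k := by
  have : ∀ d : PySem.Dict Int Int, d.contains k = d.keys.any (· == k) := by
    intro d
    simp only [PySem.Dict.contains, PySem.Dict.keys, List.any_map]
    rfl
  rw [this, this, h]

theorem pv_keys_insert_not_contains {d : PySem.Dict Int Int} {k : Int} (v : Int)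
    (h : d.contains k = false) : (d.insert k v).keys = d.keys ++ [k] := by
  simp [PySem.Dict.insert, PySem.Dict.keys, h]

theorem pv_keys_fold (re : List (List (String × Int))) :
    ∀ st : PySem.Dict Int Int × PySem.Dict Int Int, st.1.keys = st.2.keys →
      (List.foldl pvStepA st re).1.keys = (List.foldl pvStepA st re).2.keys := by
  induction re with
  | nil => intro st h; exact h
  | cons r rest ih =>
    intro st h
    refine ih _ ?_
    simp only [pvStepA]
    set k : Int := (PySem.Dict.get? (⟨r⟩ : PySem.Dict String Int) "s").getD 0 with hk
    cases hc : st.1.contains k with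
    | true =>
      rw [PySem.Dict.keys_insert_of_contains _ _ hc,
          PySem.Dict.keys_insert_of_contains _ _ (by rw [← pv_contains_of_keys_eq h]; exact hc), h]
    | false =>
      rw [pv_keys_insert_not_contains _ hc,
          pv_keys_insert_not_contains _ (by rw [← pv_contains_of_keys_eq h]; exact hc), h]

theorem pv_nodup_fold (re : List (List (String × Int))) :
    ∀ st : PySem.Dict Int Int × PySem.Dict Int Int, st.1.keys.Nodup →
      (List.foldl pvStepA st re).1.keys.Nodup := by
  induction re with
  | nil => intro st h; exact h
  | cons r rest ih =>
    intro st h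
    exact ih _ (PySem.Dict.nodup_keys_insert _ _ _ h)

theorem pv_insert_ne_nil (d : PySem.Dict Int Int) (k v : Int) : (d.insert k v).items ≠ [] := by
  cases hc : d.contains k with
  | true =>
    have : d.items ≠ [] := by
      intro hnil; simp [PySem.Dict.contains, hnil] at hc
    simp [PySem.Dict.insert, hc]
    exact this
  | false => simp [PySem.Dict.insert, hc]

theorem pv_ne_nil_fold (re : List (List (String × Int))) :
    ∀ st : PySem.Dict Int Int × PySem.Dict Int Int, st.2.items ≠ [] →
      (List.foldl pvStepA st re).2.items ≠ [] := by
  induction re with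
  | nil => intro st h; exact h
  | cons r rest ih =>
    intro st _
    exact ih _ (pv_insert_ne_nil _ _ _)

theorem pv_max?_isSome {xs : List Int} (h : xs ≠ []) (key : Int → Int) :
    (PySem.List.max? xs key).isSome = true := by
  have aux : ∀ (f : Option Int → Int → Option Int), (∀ a x, (f (some a) x).isSome = true) →
      ∀ (l : List Int) (a : Int), (List.foldl f (some a) l).isSome = true := by
    intro f hf l
    induction l with
    | nil => intro a; rfl
    | cons x t ih =>
      intro a
      simp only [List.foldl_cons]
      obtain ⟨b, hb⟩ := Option.isSome_iff_exists.mp (hf a x)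
      rw [hb]
      exact ih b
  cases xs with
  | nil => exact absurd rfl h
  | cons x t =>
    show (List.foldl _ (some x) t).isSome = true
    exact aux _ (fun a x => by dsimp only; split <;> rfl) t x

theorem pv_find?_of_nodup {items : List (Int × Int)} {p : Int × Int}
    (hnd : (items.map Prod.fst).Nodup) (hmem : p ∈ items) :
    items.find? (fun q => q.1 == p.1) = some p := by
  induction items with
  | nil => cases hmem
  | cons q t ih =>
    simp only [List.map_cons, List.nodup_cons] at hnd
    rcases List.mem_cons.mp hmem with rfl | hmem'
    · simp [List.find?]
    · by_cases hq : q.1 = p.1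
      · exact absurd (hq ▸ List.mem_map_of_mem hmem') hnd.1
      · rw [List.find?_cons_of_neg (by simpa using hq)]
        exact ih hnd.2 hmem'

-- ===== VERDICT (by name: the statement is the Claim_ definition above) =====
theorem get_final_s_spec : Claim_equal_get_final_s := by
  intro re _ hpre
  unfold Spec_get_final_s get_final_s get_final_s_alt
  have hB := pv_snd_fold re ⟨[]⟩ ⟨[]⟩
  set F := List.foldl pvStepA (⟨[]⟩, ⟨[]⟩) re with hF
  have hkeys : F.1.keys = F.2.keys := pv_keys_fold re _ rfl
  have hnd : F.1.keys.Nodup := pv_nodup_fold re _ (by simp [PySem.Dict.keys])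
  have hne : F.2.items ≠ [] := by
    obtain ⟨r, rest, rfl⟩ := List.exists_cons_of_ne_nil hpre.1
    rw [hF, List.foldl_cons]
    exact pv_ne_nil_fold rest _ (pv_insert_ne_nil _ _ _)
  have hcne : F.1.items ≠ [] := by
    intro hnil
    apply hne
    have := hkeys
    rw [PySem.Dict.keys, PySem.Dict.keys, hnil] at this
    exact List.map_eq_nil_iff.mp this.symm
  -- max over c.values is attained
  have hvne : F.1.values ≠ [] := by
    simp only [PySem.Dict.values]
    intro h; exact hcne (List.map_eq_nil_iff.mp h)
  obtain ⟨m, hm⟩ := Option.isSome_iff_exists.mp (pv_max?_isSome hvne (fun x => x))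
  have hmmem : m ∈ F.1.values := PySem.List.max?_mem hm
  obtain ⟨p, hpmem, hp2⟩ := List.mem_map.mp hmmem
  have hget : F.1.get? p.1 = some p.2 := by
    simp only [PySem.Dict.get?]
    rw [pv_find?_of_nodup hnd hpmem]
    rfl
  -- p.1 is also a key of sc, so the loop's predicate holds somewhere in sc.items
  have hksc : p.1 ∈ F.2.items.map Prod.fst := by
    rw [← PySem.Dict.keys, ← hkeys, PySem.Dict.keys]
    exact List.mem_map_of_mem hpmem
  obtain ⟨q, hqmem, hq1⟩ := List.mem_map.mp hksc
  have hfind : (F.2.items.find? (fun q => decide ((F.1.get? q.1).getD 0 =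
      (PySem.List.max? F.1.values (fun x => x)).getD 0))).isSome = true := by
    rw [List.find?_isSome]
    exact ⟨q, hqmem, by simp [hq1, hget, hm, hp2]⟩
  obtain ⟨w, hw⟩ := Option.isSome_iff_exists.mp hfind
  simp only [hw]
  -- A's surviving branch, max(sc, key=sc.get), equals B's max over order with per-class sums
  have hk : F.2.keys = pvOrder re := by
    rw [hB, pv_keys_foldB]
    rfl
  have hf : (fun k => (F.2.get? k).getD 0) = fun k => pvClassSum re k := by
    funext k
    rw [← PySem.Dict.getD_eq_get?_getD, hB, pv_getD_foldB]
    rfl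
  rw [hk, hf]
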